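-- pv_equiv track=rewrite | github.com/naringst/End-Of-Algorithm-Study | Week2/10_집합_2404/PGS_영어_끝말잇기/이규현.py | solution
-- ===== SOURCE A (Python) =====
-- def solution(n, words):
--     answer = [0,0]
--     s = set()
--     last_char = words[0][0]
--     for idx, word in enumerate(words):
--
--         s.add(word)
--         if len(s) != (idx+1) or last_char != word[0]:
--             answer[0] = (idx % n) + 1
--             answer[1] = (idx // n) + 1
--             break
--         last_char = word[-1]
--
--     return answer
-- ===== SOURCE B (Python) =====
-- def solution(n, words):
--     # Pass 1: first index whose word was already used.
--     seen = set()
--     dup = None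
--     for i, w in enumerate(words):
--         if w in seen:
--             dup = i
--             break
--         seen.add(w)
--     # Pass 2: first index whose word does not start with the previous word's last letter.
--     brk = None
--     i = 1
--     for prev, w in zip(words, words[1:]):
--         if w[0] != prev[-1]:
--             brk = i
--             break
--         i += 1
--     fails = [x for x in (dup, brk) if x is not None]
--     if not fails:
--         return [0, 0]
--     idx = min(fails)
--     return [(idx % n) + 1, (idx // n) + 1]
-- ===== Notes on version B (the rewrite author's own statement) =====
-- stated objective: alternative
-- what changed: A's single interleaved scan (set size check + carried last character with break) is replaced by two independent scans - first-duplicate index via a seen-set, first chain-break index over consecutive pairs - combined by taking the minimum failing index.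
-- outside the precondition, e.g. on solution(0, ['ab', 'bc']): A returns [0, 0], B returns [0, 0]; on solution(1, ['ab', 'ba', 'ab', '']): A returns [1, 3], B raises IndexError
-- crash fix: On the empty word list (and on the single-empty-word list [""]) A raises IndexError at words[0][0]; B returns [0,0]. — e.g. on solution(1, []): A raises IndexError, B returns [0, 0]
import Mathlib
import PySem

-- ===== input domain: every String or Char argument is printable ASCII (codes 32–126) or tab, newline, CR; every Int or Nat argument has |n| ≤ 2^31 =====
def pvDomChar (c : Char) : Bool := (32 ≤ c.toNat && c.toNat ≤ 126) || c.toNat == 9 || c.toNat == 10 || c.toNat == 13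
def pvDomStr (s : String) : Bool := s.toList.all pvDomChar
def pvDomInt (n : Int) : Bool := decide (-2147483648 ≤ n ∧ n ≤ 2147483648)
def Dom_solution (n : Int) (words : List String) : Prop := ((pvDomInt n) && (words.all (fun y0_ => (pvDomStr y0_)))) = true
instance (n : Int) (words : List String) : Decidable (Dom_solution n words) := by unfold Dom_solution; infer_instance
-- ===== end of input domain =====

-- B replaces A's single interleaved scan by two independent scans (first duplicate, first
-- chain break) combined by min — an alternative decomposition of the same linear cost.


-- ===== PORT A =====
-- word[0] / word[-1]; none marks the Python IndexError point (excluded by Pre_)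
def pvChr0 (w : String) : Option Char := PySem.Str.pyGet? w 0
def pvChrL (w : String) : Option Char := PySem.Str.pyGet? w (-1)

-- A's for-loop with break: state = remaining words, enumerate index, the set s, last_char
def solLoopA (n : Int) : List String → Int → PySem.Set String → Option Char → List Int
  | [], _, _, _ => [0, 0]
  | w :: ws, idx, s, last =>
    let s' := PySem.Set.add s w
    if PySem.Set.len s' ≠ idx + 1 ∨ last ≠ pvChr0 w then
      [PySem.Int.mod idx n + 1, PySem.Int.floordiv idx n + 1]
    else
      solLoopA n ws (idx + 1) s' (pvChrL w)

def solution (n : Int) (words : List String) : List Int :=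
  -- last_char = words[0][0]
  solLoopA n words 0 PySem.Set.empty ((PySem.List.pyGet? words 0).bind pvChr0)

-- ===== PORT B =====
-- pass 1 of Source B: first index whose word is already in the seen-set
def firstDup : List String → PySem.Set String → Int → Option Int
  | [], _, _ => none
  | w :: ws, seen, i =>
    if PySem.Set.contains seen w then some i
    else firstDup ws (PySem.Set.add seen w) (i + 1)

-- pass 2 of Source B: zip(words, words[1:]) — first index i with words[i][0] != words[i-1][-1]
def firstBrk : List String → Int → Option Int
  | [], _ => none
  | [_], _ => none
  | p :: w :: ws, i =>
    if pvChr0 w ≠ pvChrL p then some i else firstBrk (w :: ws) (i + 1)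

-- min over the non-None candidates
def optMin : Option Int → Option Int → Option Int
  | none, y => y
  | some a, none => some a
  | some a, some b => some (min a b)

def solution_alt (n : Int) (words : List String) : List Int :=
  match optMin (firstDup words PySem.Set.empty 0) (firstBrk words 1) with
  | none => [0, 0]
  | some idx => [PySem.Int.mod idx n + 1, PySem.Int.floordiv idx n + 1]

-- ===== PRECONDITION & SPEC =====
-- Pre_ excludes inputs where the Pythons raise: n = 0 (ZeroDivisionError whenever a failing
-- index is found; when the chain never fails A returns [0,0] even for n = 0 — slightly wider
-- than necessary) and empty word lists / lists containing an empty word (IndexError at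
-- word[0]/word[-1]; A returns when a duplicate stops it before reaching the empty word, but
-- B's second pass scans past that point and raises there itself).
def Pre_solution (n : Int) (words : List String) : Prop :=
  n ≠ 0 ∧ words ≠ [] ∧ ∀ w ∈ words, w ≠ ""
instance (n : Int) (words : List String) : Decidable (Pre_solution n words) := by
  unfold Pre_solution; infer_instance

def pvWitness_solution : Int × List String := (1, ["ab", "ba"])

-- On the empty word list (and on the single-empty-word list [""]) A raises IndexError at
-- words[0][0]; B returns [0,0].
def Raises_solution (n : Int) (words : List String) : Prop :=
  words = [] ∨ words = [""]
instance (n : Int) (words : List String) : Decidable (Raises_solution n words) := by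
  unfold Raises_solution; infer_instance
def pvRaiseWitness_solution : Int × List String := (1, [])
def pvRaiseWitnessOut_solution : List Int := [0, 0]

def Spec_solution (n : Int) (words : List String) (out : List Int) : Prop := out = solution_alt n words
instance (n : Int) (words : List String) (out : List Int) : Decidable (Spec_solution n words out) := by unfold Spec_solution; infer_instance

-- ===== CLAIM (what is proved, stated in full; the proofs are below) =====
def Claim_equal_solution : Prop := ∀ (n : Int) (words : List String), Dom_solution n words → Pre_solution n words → Spec_solution n words (solution n words)
def Claim_raises_solution : Prop := (∀ (n : Int) (words : List String), Dom_solution n words → Raises_solution n words → ¬ Pre_solution n words) ∧ (Dom_solution (pvRaiseWitness_solution.1) (pvRaiseWitness_solution.2) ∧ Raises_solution (pvRaiseWitness_solution.1) (pvRaiseWitness_solution.2) ∧ solution_alt (pvRaiseWitness_solution.1) (pvRaiseWitness_solution.2) = pvRaiseWitnessOut_solution)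

-- ===== LEMMAS AND PROOFS =====

-- pass 2 with only the previous word's last character carried (proof-side reformulation)
def fb2 : Option Char → List String → Int → Option Int
  | _, [], _ => none
  | c, w :: ws, i => if pvChr0 w ≠ c then some i else fb2 (pvChrL w) ws (i + 1)

theorem firstBrk_eq_fb2 : ∀ (p : String) (ws : List String) (i : Int),
    firstBrk (p :: ws) i = fb2 (pvChrL p) ws i := by
  intro p ws
  induction ws generalizing p with
  | nil => intro i; rfl
  | cons w ws ih =>
    intro i
    simp only [firstBrk, fb2]
    split_ifs with h
    · rfl
    · exact ih w (i + 1)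

theorem firstDup_ge : ∀ (ws : List String) (s : PySem.Set String) (i j : Int),
    firstDup ws s i = some j → i ≤ j := by
  intro ws
  induction ws with
  | nil => intro s i j h; simp [firstDup] at h
  | cons w ws ih =>
    intro s i j h
    simp only [firstDup] at h
    split_ifs at h with hc
    · simp at h; omega
    · have := ih (PySem.Set.add s w) (i + 1) j h; omega

theorem fb2_ge : ∀ (ws : List String) (c : Option Char) (i j : Int),
    fb2 c ws i = some j → i ≤ j := by
  intro ws
  induction ws with
  | nil => intro c i j h; simp [fb2] at h
  | cons w ws ih =>
    intro c i j h
    simp only [fb2] at h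
    split_ifs at h with hc
    · simp at h; omega
    · have := ih (pvChrL w) (i + 1) j h; omega

theorem optMin_left (i : Int) (x : Option Int) (h : ∀ j, x = some j → i ≤ j) :
    optMin (some i) x = some i := by
  cases x with
  | none => rfl
  | some b =>
    have := h b rfl
    simp [optMin, min_eq_left this]

theorem optMin_right (i : Int) (x : Option Int) (h : ∀ j, x = some j → i ≤ j) :
    optMin x (some i) = some i := by
  cases x with
  | none => rfl
  | some a =>
    have := h a rfl
    simp [optMin, min_eq_right this]

theorem set_len_add_mem (s : PySem.Set String) (w : String) (h : w ∈ s) :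
    PySem.Set.len (PySem.Set.add s w) = (s.length : Int) := by
  rw [PySem.Set.add_of_mem h]; simp [PySem.Set.len]

theorem set_len_add_not_mem (s : PySem.Set String) (w : String) (h : w ∉ s) :
    PySem.Set.len (PySem.Set.add s w) = (s.length : Int) + 1 := by
  rw [PySem.Set.add_of_not_mem h]; simp [PySem.Set.len]

theorem loop_eq (n : Int) : ∀ (ws : List String) (s : PySem.Set String) (last : Option Char) (i : Int),
    i = (s.length : Int) →
    solLoopA n ws i s last =
      (match optMin (firstDup ws s i) (fb2 last ws i) with
       | none => [0, 0]
       | some idx => [PySem.Int.mod idx n + 1, PySem.Int.floordiv idx n + 1]) := by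
  intro ws
  induction ws with
  | nil => intro s last i _; rfl
  | cons w ws ih =>
    intro s last i hi
    by_cases hmem : w ∈ s
    · -- the duplicate fires at index i (B: pass 1 reports i; pass 2 reports ≥ i)
      have hD : firstDup (w :: ws) s i = some i := by
        simp only [firstDup]; rw [if_pos (by simp [hmem])]
      have hmin : optMin (firstDup (w :: ws) s i) (fb2 last (w :: ws) i) = some i := by
        rw [hD]; exact optMin_left i _ (fun j hj => fb2_ge (w :: ws) last i j hj)
      rw [hmin]
      simp only [solLoopA]
      rw [if_pos (Or.inl (by rw [set_len_add_mem s w hmem]; omega))]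
    · by_cases hbrk : pvChr0 w = last
      · -- neither fires: both sides step to (ws, i+1, s.add w, w[-1])
        have hA : solLoopA n (w :: ws) i s last = solLoopA n ws (i + 1) (PySem.Set.add s w) (pvChrL w) := by
          simp only [solLoopA]
          rw [if_neg (by
            rintro (h | h)
            · apply h; rw [set_len_add_not_mem s w hmem]; omega
            · exact h hbrk.symm)]
        have hD : firstDup (w :: ws) s i = firstDup ws (PySem.Set.add s w) (i + 1) := by
          simp only [firstDup]; rw [if_neg (by simp [hmem])]
        have hF : fb2 last (w :: ws) i = fb2 (pvChrL w) ws (i + 1) := by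
          simp only [fb2]; rw [if_neg (by simp [hbrk])]
        rw [hA, hD, hF]
        exact ih (PySem.Set.add s w) (pvChrL w) (i + 1)
          (by rw [PySem.Set.add_of_not_mem hmem]; simp; omega)
      · -- the chain break fires at index i (B: pass 2 reports i; pass 1 reports ≥ i+1)
        have hF : fb2 last (w :: ws) i = some i := by
          simp only [fb2]; rw [if_pos hbrk]
        have hD : firstDup (w :: ws) s i = firstDup ws (PySem.Set.add s w) (i + 1) := by
          simp only [firstDup]; rw [if_neg (by simp [hmem])]
        have hmin : optMin (firstDup (w :: ws) s i) (fb2 last (w :: ws) i) = some i := by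
          rw [hF, hD]
          exact optMin_right i _ (fun j hj => by have := firstDup_ge ws (PySem.Set.add s w) (i + 1) j hj; omega)
        rw [hmin]
        simp only [solLoopA]
        rw [if_pos (Or.inr (Ne.symm hbrk))]

theorem solution_eq_alt (n : Int) (words : List String) : solution n words = solution_alt n words := by
  cases words with
  | nil => rfl
  | cons w ws =>
    unfold solution solution_alt
    have hlast : (PySem.List.pyGet? (w :: ws) 0).bind pvChr0 = pvChr0 w := by
      simp
    rw [hlast]
    -- peel the first loop iteration of A (index 0 never fails)
    have hstep : solLoopA n (w :: ws) 0 PySem.Set.empty (pvChr0 w)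
        = solLoopA n ws 1 (PySem.Set.add PySem.Set.empty w) (pvChrL w) := by
      simp only [solLoopA]
      rw [if_neg (by
        rintro (h | h)
        · apply h
          rw [set_len_add_not_mem PySem.Set.empty w (by simp [PySem.Set.empty])]
          simp [PySem.Set.empty]
        · exact h rfl)]
      norm_num
    rw [hstep]
    have h1 : (1 : Int) = ((PySem.Set.add PySem.Set.empty w).length : Int) := by
      rw [PySem.Set.add_of_not_mem (by simp [PySem.Set.empty])]
      simp [PySem.Set.empty]
    rw [loop_eq n ws (PySem.Set.add PySem.Set.empty w) (pvChrL w) 1 h1]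
    have hD : firstDup (w :: ws) PySem.Set.empty 0 = firstDup ws (PySem.Set.add PySem.Set.empty w) 1 := by
      simp only [firstDup]; rw [if_neg (by simp [PySem.Set.empty])]; norm_num
    rw [hD, firstBrk_eq_fb2 w ws 1]

-- ===== VERDICT (by name: the statement is the Claim_ definition above) =====
theorem solution_spec : Claim_equal_solution := by
  intro n words _ _
  unfold Spec_solution
  exact solution_eq_alt n words

@[simp] theorem solution_raises : Claim_raises_solution := by
  unfold Claim_raises_solution
  constructor
  · intro n words _ hr hp
    rcases hp with ⟨_, hne, hall⟩
    rcases hr with h | h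
    · exact hne h
    · exact hall "" (by simp [h]) rfl
  · exact ⟨by decide, Or.inl rfl, by decide⟩
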